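-- pv_equiv track=rewrite | github.com/DimitrovH/Hack | Week 5/1-On-Budget/budget.py | on_budget
-- ===== SOURCE A (Python) =====
-- def on_budget(books, budget):
--
--     result = {
--         "books_on_budget": 0,
--         "loan": 0
--         }
--
--     counter = 0
--     total_price = sum(books)
--     books = sorted(books)
--
--     for book in books:
--         if budget - book < 0:
--             break
--
--         budget -= book
--         total_price -= book
--         counter += 1
--
--     result["books_on_budget"] = counter
--     result["loan"] = max(0, total_price - budget)
--
--     return result
-- ===== SOURCE B (Python) =====
-- def on_budget(books, budget):
--     # No sorting: repeatedly extract the cheapest remaining book while it fits.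
--     # The loan is a closed form: the original's total_price - budget is loop-invariant.
--     remaining = list(books)
--     count = 0
--     left = budget
--     while remaining:
--         cheapest = min(remaining)
--         if cheapest > left:
--             break
--         remaining.remove(cheapest)
--         left -= cheapest
--         count += 1
--     return {"books_on_budget": count, "loan": max(0, sum(books) - budget)}
-- ===== Notes on version B (the rewrite author's own statement) =====
-- stated objective: alternative
-- what changed: B never sorts: it repeatedly extracts the minimum of a shrinking working list (selection-style greedy over an unsorted list) to count affordable books, and computes the loan in closed form as max(0, sum(books) - budget), using the fact that A's total_price - budget is loop-invariant.
import Mathlib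
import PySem

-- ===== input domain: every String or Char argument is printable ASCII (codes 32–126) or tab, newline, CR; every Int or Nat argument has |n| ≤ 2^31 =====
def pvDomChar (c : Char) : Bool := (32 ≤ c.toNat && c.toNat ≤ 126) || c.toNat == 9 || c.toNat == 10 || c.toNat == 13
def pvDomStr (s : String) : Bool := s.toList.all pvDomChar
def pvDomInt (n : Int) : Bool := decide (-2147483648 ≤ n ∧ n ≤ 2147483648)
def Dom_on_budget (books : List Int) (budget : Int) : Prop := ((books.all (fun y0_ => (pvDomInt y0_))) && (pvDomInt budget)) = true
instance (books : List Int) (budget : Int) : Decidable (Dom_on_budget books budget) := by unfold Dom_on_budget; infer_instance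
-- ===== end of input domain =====

-- B avoids sorting: it repeatedly extracts the minimum of a shrinking working list, and
-- computes the loan in closed form (A's total_price - budget is loop-invariant); objective: alternative.

-- ===== PORT A =====
-- A's for-loop with break, state (budget, total_price, counter)
def on_budget_loop : List Int → Int → Int → Int → Int × Int × Int
  | [], budget, total, counter => (budget, total, counter)
  | book :: rest, budget, total, counter =>
    if budget - book < 0 then (budget, total, counter)
    else on_budget_loop rest (budget - book) (total - book) (counter + 1)

def on_budget (books : List Int) (budget : Int) : List (String × Int) :=
  let total_price := books.sum
  let bks := PySem.List.sorted books (fun x => x) false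
  let st := on_budget_loop bks budget total_price 0
  [("books_on_budget", st.2.2), ("loan", max 0 (st.2.1 - st.1))]

-- ===== PORT B =====
-- B's while-loop: extract min(remaining), remove it, until it no longer fits.
-- Returns the final count; `none` branches are Python-unreachable (min/remove of nonempty/member).
def on_budget_alt_loop (remaining : List Int) (left : Int) (count : Int) : Int :=
  match hm : PySem.List.min? remaining (fun x => x) with
  | none => count
  | some cheapest =>
    if cheapest > left then count
    else
      match hr : PySem.List.remove? remaining cheapest with
      | none => count
      | some rest => on_budget_alt_loop rest (left - cheapest) (count + 1)
termination_by remaining.length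
decreasing_by
  have hmem : cheapest ∈ remaining := PySem.List.min?_mem hm
  have hrest : rest = remaining.erase cheapest := by
    have := PySem.List.remove?_eq_some_erase remaining cheapest hmem
    rw [hr] at this; exact Option.some.inj this
  subst hrest
  have hpos : 0 < remaining.length := List.length_pos_of_mem hmem
  simp [hmem]
  omega

def on_budget_alt (books : List Int) (budget : Int) : List (String × Int) :=
  let count := on_budget_alt_loop books budget 0
  [("books_on_budget", count), ("loan", max 0 (books.sum - budget))]

-- ===== PRECONDITION & SPEC =====
def Spec_on_budget (books : List Int) (budget : Int) (out : List (String × Int)) : Prop := out = on_budget_alt books budget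
instance (books : List Int) (budget : Int) (out : List (String × Int)) : Decidable (Spec_on_budget books budget out) := by unfold Spec_on_budget; infer_instance

-- ===== CLAIM (what is proved, stated in full; the proofs are below) =====
def Claim_equal_on_budget : Prop := ∀ (books : List Int) (budget : Int), Dom_on_budget books budget → Spec_on_budget books budget (on_budget books budget)

-- ===== LEMMAS AND PROOFS =====

-- total_price - budget is invariant through A's loop
theorem on_budget_loop_inv (l : List Int) (b t c : Int) :
    (on_budget_loop l b t c).2.1 - (on_budget_loop l b t c).1 = t - b := by
  induction l generalizing b t c with
  | nil => simp [on_budget_loop]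
  | cons x xs ih =>
    simp only [on_budget_loop]
    split_ifs with h
    · simp
    · rw [ih]; omega

-- A's counter over the sorted list equals B's min-extraction counter
theorem counter_eq (n : ℕ) : ∀ (l : List Int), l.length ≤ n → ∀ (b t c : Int),
    (on_budget_loop (PySem.List.sorted l (fun x => x) false) b t c).2.2
      = on_budget_alt_loop l b c := by
  induction n with
  | zero =>
    intro l hl b t c
    have : l = [] := List.eq_nil_of_length_eq_zero (Nat.le_zero.mp hl)
    subst this
    rw [on_budget_alt_loop]
    simp [on_budget_loop, PySem.List.sorted, PySem.List.min?]
  | succ n ih =>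
    intro l hl b t c
    cases hls : PySem.List.sorted l (fun x => x) false with
    | nil =>
      have : l = [] := (PySem.List.sorted_eq_nil_iff l (fun x => x) false).mp hls
      subst this
      rw [on_budget_alt_loop]
      simp [on_budget_loop, PySem.List.sorted, PySem.List.min?] at hls ⊢
    | cons m tail =>
      have hlne : l ≠ [] := by
        intro h; subst h; simp [PySem.List.sorted] at hls
      -- min? l = some m' with m' = m (equal as values)
      obtain ⟨m', hm'⟩ : ∃ m', PySem.List.min? l (fun x => x) = some m' := by
        cases h : PySem.List.min? l (fun x => x) with
        | none => exact absurd ((PySem.List.min?_eq_none_iff l (fun x => x)).mp h) hlne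
        | some v => exact ⟨v, rfl⟩
      have hmem' : m' ∈ l := PySem.List.min?_mem hm'
      have hmmem : m ∈ l := by
        have : m ∈ PySem.List.sorted l (fun x => x) false := by rw [hls]; exact List.mem_cons_self
        exact (PySem.List.mem_sorted l (fun x => x) false m).mp this
      have hmm' : m' = m := by
        have h1 : m ≤ m' := PySem.List.key_head_sorted_le l (fun x => x) hls m' hmem'
        have h2 : m' ≤ m := PySem.List.min?_isMin hm' m hmmem
        omega
      subst hmm'
      -- tail = sorted (l.erase m')
      have hperm : l.Perm (m' :: tail) := by
        have := PySem.List.sorted_perm l (fun x => x) false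
        rw [hls] at this; exact this.symm
      have htail_pw : tail.Pairwise (fun a b : Int => a ≤ b) := by
        have := PySem.List.sorted_pairwise l (fun x => x)
        rw [hls] at this
        exact this.of_cons
      have htail : PySem.List.sorted (l.erase m') (fun x => x) false = tail := by
        apply PySem.List.sorted_id_eq_of_perm_of_pairwise
        · have := hperm.erase m'
          simpa using this.symm
        · exact htail_pw
      have hlen : (l.erase m').length ≤ n := by
        have hpos : 0 < l.length := List.length_pos_of_mem hmem'
        simp [hmem']
        omega
      -- unfold both loops one step
      have hrem : PySem.List.remove? l m' = some (l.erase m') :=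
        PySem.List.remove?_eq_some_erase l m' hmem'
      conv_rhs => rw [on_budget_alt_loop]
      split
      next h => rw [hm'] at h; cases h
      next cheapest h =>
        rw [hm'] at h
        obtain rfl : m' = cheapest := by injection h
        split
        next hfit =>
          have hfit' : b - m' < 0 := by omega
          simp only [on_budget_loop, if_pos hfit']
        next hfit =>
          have hfit' : ¬ b - m' < 0 := by omega
          simp only [on_budget_loop, if_neg hfit']
          split
          next h2 => rw [hrem] at h2; cases h2
          next rest h2 =>
            rw [hrem] at h2
            obtain rfl : l.erase m' = rest := by injection h2
            have := ih (l.erase m') hlen (b - m') (t - m') (c + 1)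
            rw [htail] at this
            exact this

-- ===== VERDICT (by name: the statement is the Claim_ definition above) =====
theorem on_budget_spec : Claim_equal_on_budget := by
  intro books budget _
  unfold Spec_on_budget on_budget on_budget_alt
  have hc := counter_eq books.length books (le_refl _) budget books.sum 0
  simp [hc, on_budget_loop_inv]
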